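-- pv_equiv track=rewrite | github.com/AnastassiyaR/Python_exercises | MX/mx_data_structures/data_structures.py | unique_primes
-- ===== SOURCE A (Python) =====
-- def unique_primes(numbers) -> set:
--     """
--     Identify unique prime numbers from a list.
--
--     Number is prime if it is greater than 1 and has no divisors other than 1 and itself. Unique means that there is only
--     one occurrence of the prime number in the result even if it occurs multiple times in the input.
--
--     :param numbers: A list of integers.
--     :return: A set of unique prime numbers from the list.
--     """
--     def is_prime(n):
--         if n <= 1:
--             return False
--         for i in range(2, int(n ** 0.5) + 1):
--             if n % i == 0:
--                 return False
--         return True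
--
--     return {num for num in set(numbers) if is_prime(num)}
-- ===== SOURCE B (Python) =====
-- def unique_primes(numbers) -> set:
--     """Sieve-based re-implementation: one prime table up to sqrt(max), then
--     each candidate is tested only against the precomputed primes."""
--     values = set(numbers)
--     candidates = {n for n in values if n > 1}
--     if not candidates:
--         return set()
--     m = max(candidates)
--     limit = 1
--     while (limit + 1) * (limit + 1) <= m:
--         limit += 1
--     sieve = [True] * (limit + 1)
--     for i in range(2, limit + 1):
--         for j in range(2 * i, limit + 1, i):
--             sieve[j] = False
--     primes = [i for i in range(2, limit + 1) if sieve[i]]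
--     return {n for n in candidates
--             if all(p * p > n or n % p != 0 for p in primes)}
-- ===== Notes on version B (the rewrite author's own statement) =====
-- stated objective: faster
-- what changed: Replaces per-number trial division up to sqrt(n) by a single sieve-of-Eratosthenes-style table of primes up to sqrt(max), so each candidate is tested only against precomputed primes.
import Mathlib
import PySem

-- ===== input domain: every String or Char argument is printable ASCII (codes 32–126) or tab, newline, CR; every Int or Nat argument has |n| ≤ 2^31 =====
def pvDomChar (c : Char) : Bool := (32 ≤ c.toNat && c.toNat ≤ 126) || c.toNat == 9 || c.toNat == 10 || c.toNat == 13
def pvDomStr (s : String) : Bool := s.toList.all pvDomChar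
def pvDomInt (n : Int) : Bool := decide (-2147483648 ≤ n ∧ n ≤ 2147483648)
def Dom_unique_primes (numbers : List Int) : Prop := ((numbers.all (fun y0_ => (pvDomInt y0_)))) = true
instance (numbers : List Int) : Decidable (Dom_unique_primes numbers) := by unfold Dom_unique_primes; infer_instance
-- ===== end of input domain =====

-- B replaces per-number √n trial division by one sieve-built prime table up to √max, consulted for every candidate (objective: faster).

-- ===== PORT A =====
-- is_prime: `int(n ** 0.5)` is ported as Nat.sqrt n.toNat — exact for 0 ≤ n ≤ 2^31 (the stated domain).
def isPrimeA (n : Int) : Bool :=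
  if n ≤ 1 then false
  else
    (PySem.List.pyRange 2 ((Nat.sqrt n.toNat : Int) + 1) 1).all
      (fun i => !(PySem.Int.mod n i == 0))

def unique_primes (numbers : List Int) : List Int :=
  PySem.Set.ofList ((PySem.Set.ofList numbers).filter (fun num => isPrimeA num))

-- ===== PORT B =====
-- Source B's `limit = 1; while (limit+1)*(limit+1) <= m: limit += 1`
def climbSqrt (m limit : Int) : Int :=
  if h : (limit + 1) * (limit + 1) ≤ m then climbSqrt m (limit + 1) else limit
termination_by (m - limit).toNat
decreasing_by
  have h2 : limit + 1 ≤ (limit + 1) * (limit + 1) := by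
    by_cases h' : 1 ≤ limit + 1
    · simpa using mul_le_mul_of_nonneg_left h' (by omega : (0:Int) ≤ limit + 1)
    · calc limit + 1 ≤ 0 := by omega
        _ ≤ (limit + 1) * (limit + 1) := mul_self_nonneg _
  omega

-- Source B's sieve block: sieve = [True]*(limit+1); for i in range(2, limit+1): for j in range(2*i, limit+1, i): sieve[j] = False
-- (the mutable Python list is an Array; every index written or read is in range 0..limit, so setIfInBounds/getD are exact)
def sieveOf (L : Int) : Array Bool :=
  (PySem.List.pyRange 2 (L + 1) 1).foldl
    (fun s i =>
      (PySem.List.pyRange (2 * i) (L + 1) i).foldl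
        (fun s j => s.setIfInBounds j.toNat false) s)
    (Array.replicate (L + 1).toNat true)

-- Source B's primes = [i for i in range(2, limit+1) if sieve[i]]
def primesOf (L : Int) : List Int :=
  let sieve := sieveOf L
  (PySem.List.pyRange 2 (L + 1) 1).filter (fun i => sieve.getD i.toNat false)

def unique_primes_alt (numbers : List Int) : List Int :=
  let values := PySem.Set.ofList numbers
  let candidates : PySem.Set Int := PySem.Set.ofList (values.filter (fun n => decide (1 < n)))
  if candidates.isEmpty then []
  else
    let m := (PySem.List.max? candidates (fun x => x)).getD 0  -- candidates ≠ [], so max? is some; the default is never used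
    let primes := primesOf (climbSqrt m 1)
    PySem.Set.ofList (candidates.filter (fun n =>
      primes.all (fun p => decide (n < p * p) || !(PySem.Int.mod n p == 0))))

-- ===== PRECONDITION & SPEC =====
def Spec_unique_primes (numbers : List Int) (out : List Int) : Prop := out = unique_primes_alt numbers
instance (numbers : List Int) (out : List Int) : Decidable (Spec_unique_primes numbers out) := by unfold Spec_unique_primes; infer_instance

-- ===== CLAIM (what is proved, stated in full; the proofs are below) =====
def Claim_equal_unique_primes : Prop := ∀ (numbers : List Int), Dom_unique_primes numbers → Spec_unique_primes numbers (unique_primes numbers)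

-- ===== LEMMAS AND PROOFS =====

theorem climbSqrt_spec (m limit : Int) (h1 : 1 ≤ limit) (h2 : limit * limit ≤ m) :
    1 ≤ climbSqrt m limit ∧ climbSqrt m limit * climbSqrt m limit ≤ m ∧
      m < (climbSqrt m limit + 1) * (climbSqrt m limit + 1) := by
  unfold climbSqrt
  split_ifs with h
  · exact climbSqrt_spec m (limit + 1) (by omega) h
  · exact ⟨h1, h2, not_le.mp h⟩
termination_by (m - limit).toNat
decreasing_by
  have h2' : limit + 1 ≤ (limit + 1) * (limit + 1) := by
    by_cases h' : 1 ≤ limit + 1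
    · simpa using mul_le_mul_of_nonneg_left h' (by omega : (0:Int) ≤ limit + 1)
    · calc limit + 1 ≤ 0 := by omega
        _ ≤ (limit + 1) * (limit + 1) := mul_self_nonneg _
  omega

theorem set_false_getD (s : List Bool) (n k : Nat) :
    (s.set n false).getD k false = if n = k then false else s.getD k false := by
  simp only [List.getD_eq_getElem?_getD, List.getElem?_set]
  split_ifs with h1 h2 <;> simp

theorem foldl_setfalse_getD (js : List Int) (s : List Bool) (k : Nat) :
    (js.foldl (fun s j => s.set j.toNat false) s).getD k false
      = (s.getD k false && !(js.any (fun j => j.toNat == k))) := by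
  induction js generalizing s with
  | nil => simp
  | cons j js ih =>
    rw [List.foldl_cons, ih, set_false_getD]
    by_cases h : j.toNat = k
    · simp [h]
    · have hb : (j.toNat == k) = false := beq_eq_false_iff_ne.mpr h
      simp [hb, h]

theorem sieve_foldl_getD (L : Int) (is : List Int) (s : List Bool) (k : Nat) :
    ((is.foldl (fun s i =>
        (PySem.List.pyRange (2 * i) (L + 1) i).foldl
          (fun s j => s.set j.toNat false) s) s).getD k false)
      = (s.getD k false &&
          !(is.any (fun i => (PySem.List.pyRange (2 * i) (L + 1) i).any (fun j => j.toNat == k)))) := by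
  induction is generalizing s with
  | nil => simp
  | cons i is ih =>
    rw [List.foldl_cons, ih, foldl_setfalse_getD]
    cases s.getD k false <;> simp [Bool.not_or]

theorem array_getD_toList (a : Array Bool) (k : Nat) (d : Bool) :
    a.getD k d = a.toList.getD k d := by
  rw [Array.getD_eq_getD_getElem?, List.getD_eq_getElem?_getD, Array.getElem?_toList]

theorem toList_foldl_set (js : List Int) (a : Array Bool) :
    (js.foldl (fun s j => s.setIfInBounds j.toNat false) a).toList
      = js.foldl (fun s j => s.set j.toNat false) a.toList := by
  induction js generalizing a with
  | nil => rfl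
  | cons j js ih => rw [List.foldl_cons, List.foldl_cons, ih, Array.toList_setIfInBounds]

theorem sieveOf_toList (L : Int) :
    (sieveOf L).toList
      = (PySem.List.pyRange 2 (L + 1) 1).foldl
          (fun s i =>
            (PySem.List.pyRange (2 * i) (L + 1) i).foldl
              (fun s j => s.set j.toNat false) s)
          (List.replicate (L + 1).toNat true) := by
  unfold sieveOf
  rw [← Array.toList_replicate]
  generalize (Array.replicate (L + 1).toNat true) = a
  induction (PySem.List.pyRange 2 (L + 1) 1) generalizing a with
  | nil => rfl
  | cons i is ih => rw [List.foldl_cons, List.foldl_cons, ih, toList_foldl_set]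

theorem mem_cross_iff (i : Int) (hi : 2 ≤ i) (L : Int) (k : Nat) :
    (PySem.List.pyRange (2 * i) (L + 1) i).any (fun j => j.toNat == k) = true
      ↔ (i ∣ (k : Int) ∧ 2 * i ≤ (k : Int) ∧ (k : Int) ≤ L) := by
  rw [List.any_eq_true]
  constructor
  · rintro ⟨j, hj, hjk⟩
    rw [PySem.List.mem_pyRange_iff_of_pos (by omega)] at hj
    obtain ⟨hj1, hj2, hj3⟩ := hj
    have hj0 : 0 ≤ j := by omega
    have hjk' : j.toNat = k := by simpa using hjk
    have hjeq : (k : Int) = j := by omega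
    have hdvd : i ∣ j := by
      have : j = (j - 2 * i) + 2 * i := by ring
      rw [this]
      exact dvd_add hj3 (dvd_mul_left i 2)
    exact ⟨hjeq ▸ hdvd, by omega, by omega⟩
  · rintro ⟨hdvd, h1, h2⟩
    refine ⟨(k : Int), ?_, by simp⟩
    rw [PySem.List.mem_pyRange_iff_of_pos (by omega)]
    exact ⟨h1, by omega, dvd_sub hdvd (dvd_mul_left i 2)⟩

theorem sieveOf_getD (L : Int) (k : Nat) (h2 : 2 ≤ (k : Int)) (hk : (k : Int) ≤ L) :
    (sieveOf L).getD k false = true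
      ↔ ¬ ∃ i : Int, 2 ≤ i ∧ i ∣ (k : Int) ∧ 2 * i ≤ (k : Int) := by
  rw [array_getD_toList, sieveOf_toList, sieve_foldl_getD L _ _ k]
  have hrep : (List.replicate (L + 1).toNat true).getD k false = true := by
    rw [List.getD_eq_getElem?_getD, List.getElem?_replicate, if_pos (by omega)]
    rfl
  rw [hrep, Bool.true_and, Bool.not_eq_true', List.any_eq_false]
  constructor
  · rintro h ⟨i, hi2, hdvd, hle⟩
    have hmem : i ∈ PySem.List.pyRange 2 (L + 1) 1 :=
      PySem.List.mem_pyRange_one.mpr ⟨hi2, by omega⟩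
    have := h i hmem
    exact absurd ((mem_cross_iff i hi2 L k).mpr ⟨hdvd, hle, hk⟩) (by simpa using this)
  · intro h i hi
    rw [PySem.List.mem_pyRange_one] at hi
    intro hc
    obtain ⟨hdvd, hle, _⟩ := (mem_cross_iff i hi.1 L k).mp hc
    exact h ⟨i, hi.1, hdvd, hle⟩

theorem not_exists_iff_prime (k : Int) (h2 : 2 ≤ k) :
    (¬ ∃ i : Int, 2 ≤ i ∧ i ∣ k ∧ 2 * i ≤ k) ↔ Nat.Prime k.toNat := by
  constructor
  · intro h
    by_contra hnp
    have hp := Nat.minFac_prime (show k.toNat ≠ 1 by omega)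
    obtain ⟨c, hc⟩ := Nat.minFac_dvd k.toNat
    have hq2 : 2 ≤ k.toNat.minFac := hp.two_le
    have hc1 : c ≠ 1 := by
      rintro rfl
      rw [mul_one] at hc
      exact hnp (hc ▸ hp)
    have hc0 : c ≠ 0 := by rintro rfl; omega
    have hc2 : 2 ≤ c := by omega
    refine h ⟨(k.toNat.minFac : Int), by exact_mod_cast hq2, ?_, ?_⟩
    · have : (k.toNat.minFac : Int) ∣ (k.toNat : Int) :=
        Int.natCast_dvd_natCast.mpr ⟨c, hc⟩
      simpa [Int.toNat_of_nonneg (by omega : (0:Int) ≤ k)] using this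
    · have : 2 * k.toNat.minFac ≤ k.toNat := by
        calc 2 * k.toNat.minFac = k.toNat.minFac * 2 := by ring
          _ ≤ k.toNat.minFac * c := Nat.mul_le_mul_left _ hc2
          _ = k.toNat := hc.symm
      omega
  · rintro hp ⟨i, hi2, hdvd, hle⟩
    have hdn : i.toNat ∣ k.toNat := by
      have h1 : ((i.toNat : Int)) ∣ ((k.toNat : Int)) := by
        rwa [Int.toNat_of_nonneg (by omega : (0:Int) ≤ i),
             Int.toNat_of_nonneg (by omega : (0:Int) ≤ k)]
      exact_mod_cast h1
    rcases hp.eq_one_or_self_of_dvd i.toNat hdn with h1 | h1 <;> omega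

theorem mem_primesOf (L : Int) (p : Int) :
    p ∈ primesOf L ↔ 2 ≤ p ∧ p ≤ L ∧ Nat.Prime p.toNat := by
  unfold primesOf
  rw [List.mem_filter, PySem.List.mem_pyRange_one]
  constructor
  · rintro ⟨⟨hp2, hpL⟩, hs⟩
    refine ⟨hp2, by omega, ?_⟩
    have h1 := (sieveOf_getD L p.toNat (by omega) (by omega)).mp hs
    have h2 := (not_exists_iff_prime (p.toNat : Int) (by omega)).mp h1
    rwa [Int.toNat_natCast] at h2
  · rintro ⟨hp2, hpL, hpp⟩
    refine ⟨⟨hp2, by omega⟩, ?_⟩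
    exact (sieveOf_getD L p.toNat (by omega) (by omega)).mpr
      ((not_exists_iff_prime (p.toNat : Int) (by omega)).mpr (by rwa [Int.toNat_natCast]))

theorem isPrimeA_iff (n : Int) (h2 : 2 ≤ n) : isPrimeA n = true ↔ Nat.Prime n.toNat := by
  unfold isPrimeA
  rw [if_neg (by omega), List.all_eq_true]
  constructor
  · intro h
    rw [Nat.prime_def_le_sqrt]
    refine ⟨by omega, fun d hd2 hdle hdvd => ?_⟩
    have hmem : (d : Int) ∈ PySem.List.pyRange 2 ((Nat.sqrt n.toNat : Int) + 1) 1 :=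
      PySem.List.mem_pyRange_one.mpr ⟨by exact_mod_cast hd2, by omega⟩
    have hdd : (d : Int) ∣ n := by
      have : ((d : Int)) ∣ ((n.toNat : Int)) := Int.natCast_dvd_natCast.mpr hdvd
      simpa [Int.toNat_of_nonneg (by omega : (0:Int) ≤ n)] using this
    have := h (d : Int) hmem
    rw [Bool.not_eq_true', Bool.eq_false_iff] at this
    exact this (by simpa using (PySem.Int.mod_eq_zero_iff_dvd n (d : Int)).mpr hdd)
  · intro hp i hi
    rw [PySem.List.mem_pyRange_one] at hi
    have hnd : ¬ i ∣ n := by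
      intro hdvd
      have hdn : i.toNat ∣ n.toNat := by
        have h1 : ((i.toNat : Int)) ∣ ((n.toNat : Int)) := by
          rwa [Int.toNat_of_nonneg (by omega : (0:Int) ≤ i),
               Int.toNat_of_nonneg (by omega : (0:Int) ≤ n)]
        exact_mod_cast h1
      exact (Nat.prime_def_le_sqrt.mp hp).2 i.toNat (by omega) (by omega) hdn
    have h0 : PySem.Int.mod n i ≠ 0 := fun hm => hnd ((PySem.Int.mod_eq_zero_iff_dvd n i).mp hm)
    simp [h0]

theorem predB_iff (L m n : Int) (hL1 : 1 ≤ L) (hLm : m < (L + 1) * (L + 1)) (hn2 : 2 ≤ n) (hnm : n ≤ m) :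
    (primesOf L).all (fun p => decide (n < p * p) || !(PySem.Int.mod n p == 0)) = true
      ↔ Nat.Prime n.toNat := by
  rw [List.all_eq_true]
  constructor
  · intro h
    by_contra hnp
    have hp := Nat.minFac_prime (show n.toNat ≠ 1 by omega)
    have hsq := Nat.minFac_sq_le_self (show 0 < n.toNat by omega) hnp
    have hq2 : 2 ≤ n.toNat.minFac := hp.two_le
    have hqq : (n.toNat.minFac : Int) * (n.toNat.minFac : Int) ≤ n := by
      have h1 : (n.toNat.minFac * n.toNat.minFac : Nat) ≤ n.toNat := by
        rw [← pow_two]; exact hsq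
      have h2 : ((n.toNat.minFac * n.toNat.minFac : Nat) : Int) ≤ ((n.toNat : Nat) : Int) :=
        Int.ofNat_le.mpr h1
      push_cast at h2
      rwa [Int.toNat_of_nonneg (by omega : (0:Int) ≤ n)] at h2
    have hqL : (n.toNat.minFac : Int) ≤ L := by
      by_contra hgt
      have hL1 : L + 1 ≤ (n.toNat.minFac : Int) := by omega
      have hsq2 : (L + 1) * (L + 1) ≤ (n.toNat.minFac : Int) * (n.toNat.minFac : Int) :=
        mul_le_mul hL1 hL1 (by omega) (by omega)
      linarith [hqq, hnm, hLm, hsq2]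
    have hmem : (n.toNat.minFac : Int) ∈ primesOf L :=
      (mem_primesOf L _).mpr ⟨by exact_mod_cast hq2, hqL, by rwa [Int.toNat_natCast]⟩
    have hdvd : (n.toNat.minFac : Int) ∣ n := by
      have : ((n.toNat.minFac : Nat) : Int) ∣ ((n.toNat : Nat) : Int) :=
        Int.natCast_dvd_natCast.mpr (Nat.minFac_dvd _)
      simpa [Int.toNat_of_nonneg (by omega : (0:Int) ≤ n)] using this
    have hcond := h _ hmem
    rw [Bool.or_eq_true] at hcond
    rcases hcond with hlt | hmod
    · have : n < (n.toNat.minFac : Int) * (n.toNat.minFac : Int) := by simpa using hlt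
      omega
    · have h0 := (PySem.Int.mod_eq_zero_iff_dvd n (n.toNat.minFac : Int)).mpr hdvd
      simp [h0] at hmod
  · intro hp p hpmem
    obtain ⟨hp2, hpL, hpprime⟩ := (mem_primesOf L p).mp hpmem
    rw [Bool.or_eq_true]
    by_cases hlt : n < p * p
    · left; simpa
    · right
      have hnd : ¬ p ∣ n := by
        intro hdvd
        have hdn : p.toNat ∣ n.toNat := by
          have h1 : ((p.toNat : Int)) ∣ ((n.toNat : Int)) := by
            rwa [Int.toNat_of_nonneg (by omega : (0:Int) ≤ p),
                 Int.toNat_of_nonneg (by omega : (0:Int) ≤ n)]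
          exact_mod_cast h1
        rcases hp.eq_one_or_self_of_dvd p.toNat hdn with h1 | h1
        · omega
        · have hpn : p = n := by omega
          rw [hpn, not_lt] at hlt
          nlinarith
      have h0 : PySem.Int.mod n p ≠ 0 := fun hm => hnd ((PySem.Int.mod_eq_zero_iff_dvd n p).mp hm)
      simp [h0]

theorem isPrimeA_gt_one (n : Int) (h : isPrimeA n = true) : 1 < n := by
  by_contra hle
  unfold isPrimeA at h
  rw [if_pos (by omega)] at h
  exact absurd h (by simp)

-- ===== VERDICT (by name: the statement is the Claim_ definition above) =====
theorem unique_primes_spec : Claim_equal_unique_primes := by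
  intro numbers _hdom
  unfold Spec_unique_primes
  simp only [unique_primes, unique_primes_alt]
  set vals := PySem.Set.ofList numbers with hvals
  have hnodup : vals.Nodup := PySem.Set.nodup_ofList numbers
  rw [PySem.Set.ofList_eq_self_of_nodup _ (hnodup.filter _)]
  set cands := PySem.Set.ofList (vals.filter (fun n => decide (1 < n))) with hcands
  have hcnd : (vals.filter (fun n => decide (1 < n))).Nodup := hnodup.filter _
  have hceq : cands = vals.filter (fun n => decide (1 < n)) :=
    PySem.Set.ofList_eq_self_of_nodup _ hcnd
  by_cases hemp : cands.isEmpty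
  · rw [if_pos hemp]
    have hnil : vals.filter (fun n => decide (1 < n)) = [] := by
      rw [← hceq]; exact List.isEmpty_iff.mp hemp
    rw [List.filter_eq_nil_iff]
    intro a ha hpa
    exact (List.filter_eq_nil_iff.mp hnil) a ha (by simp [isPrimeA_gt_one a hpa])
  · rw [if_neg hemp]
    have hne : cands ≠ [] := fun h => by simp [h] at hemp
    obtain ⟨m, hm⟩ : ∃ m, PySem.List.max? cands (fun x => x) = some m := by
      cases h : PySem.List.max? cands (fun x => x) with
      | none => exact absurd ((PySem.List.max?_eq_none_iff _ _).mp h) hne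
      | some m => exact ⟨m, rfl⟩
    rw [hm]
    simp only [Option.getD_some]
    have hmmem : m ∈ cands := PySem.List.max?_mem hm
    have hmax : ∀ y ∈ cands, y ≤ m := fun y hy => PySem.List.max?_isMax hm y hy
    have hm2 : 2 ≤ m := by
      rw [hceq, List.mem_filter] at hmmem
      have := hmmem.2
      simp at this
      omega
    have h11 : (1:Int) * 1 ≤ m := by rw [one_mul]; omega
    obtain ⟨hL1, hLle, hLlt⟩ := climbSqrt_spec m 1 (le_refl 1) h11
    rw [PySem.Set.ofList_eq_self_of_nodup _ ((hceq ▸ hcnd).filter _)]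
    rw [hceq, List.filter_filter]
    apply List.filter_congr
    intro x hx
    by_cases hx2 : 1 < x
    · have hxc : x ∈ cands := by
        rw [hceq, List.mem_filter]; exact ⟨hx, by simp [hx2]⟩
      have hxm : x ≤ m := hmax x hxc
      have hA := isPrimeA_iff x (by omega)
      have hB := predB_iff (climbSqrt m 1) m x hL1 hLlt (by omega) hxm
      simp only [hx2, decide_true, Bool.and_true]
      have hiff : isPrimeA x = true ↔
          (primesOf (climbSqrt m 1)).all
            (fun p => decide (x < p * p) || !(PySem.Int.mod x p == 0)) = true :=
        hA.trans hB.symm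
      have hbool : ∀ (a b : Bool), (a = true ↔ b = true) → a = b := by decide
      exact hbool _ _ hiff
    · have hf : isPrimeA x = false := by
        unfold isPrimeA; rw [if_pos (by omega)]
      simp [hf, hx2]
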